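-- pv_equiv track=rewrite | github.com/tkstanch/Megido | sql_attacker/payload_generator.py | _hex_encode_chars
-- ===== SOURCE A (Python) =====
-- def _hex_encode_chars(text: str, chars_to_encode: str = ' ') -> str:
--     """Hex encode specific characters"""
--     result = []
--     for c in text:
--         if c in chars_to_encode:
--             result.append(f"%{ord(c):02x}")
--         else:
--             result.append(c)
--     return ''.join(result)
-- ===== SOURCE B (Python) =====
-- def _hex_encode_chars(text: str, chars_to_encode: str = ' ') -> str:
--     """Hex encode specific characters"""
--     special = set(chars_to_encode)
--     parts = []
--     i, n = 0, len(text)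
--     while i < n:
--         j = i
--         while j < n and text[j] not in special:
--             j += 1
--         parts.append(text[i:j])
--         if j < n:
--             parts.append("%%%02x" % ord(text[j]))
--             j += 1
--         i = j
--     return "".join(parts)
-- ===== Notes on version B (the rewrite author's own statement) =====
-- stated objective: alternative
-- what changed: Replaces the per-character branch-and-append loop by a run-based two-index scan: a precomputed set, an outer loop that slices off each maximal run of unencoded characters in one piece and then encodes the single delimiter found after it.
import Mathlib
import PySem

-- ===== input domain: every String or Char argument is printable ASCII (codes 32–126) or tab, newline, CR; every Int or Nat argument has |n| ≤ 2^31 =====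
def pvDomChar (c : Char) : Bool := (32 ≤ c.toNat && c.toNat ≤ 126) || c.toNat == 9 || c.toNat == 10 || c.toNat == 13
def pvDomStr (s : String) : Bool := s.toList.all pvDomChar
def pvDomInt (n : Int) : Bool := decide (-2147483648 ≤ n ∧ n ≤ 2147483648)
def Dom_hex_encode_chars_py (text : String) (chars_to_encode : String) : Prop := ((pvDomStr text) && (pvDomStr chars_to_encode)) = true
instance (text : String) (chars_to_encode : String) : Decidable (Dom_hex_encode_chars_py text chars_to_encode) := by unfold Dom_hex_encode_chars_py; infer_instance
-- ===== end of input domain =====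

-- B replaces A's per-character branch-and-append loop by a run-based scan: a precomputed set,
-- an outer loop slicing off each maximal run of unencoded characters in one piece, then the delimiter.


-- shared formatting helper: the format string "%" + two-digit lowercase hex of n
-- (f"%{n:02x}" in A, "%%%02x" % n in B — the same format, exact for n ≥ 0, which is every ord(c))
def pvHexDigit (n : Nat) : Char :=
  if n < 10 then Char.ofNat (48 + n) else Char.ofNat (87 + n)

def pvToHex (n : Nat) : List Char :=
  if n < 16 then [pvHexDigit n]
  else pvToHex (n / 16) ++ [pvHexDigit (n % 16)]
  decreasing_by exact Nat.div_lt_self (by omega) (by omega)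

def pvPct (n : Nat) : List Char :=
  '%' :: (if (pvToHex n).length < 2 then '0' :: pvToHex n else pvToHex n)

-- ===== PORT A =====
-- literal port: accumulate a list of strings, branching per character, then ''.join
def hex_encode_chars_py (text : String) (chars_to_encode : String) : String :=
  let result : List String :=
    text.toList.foldl (fun acc c =>
      if PySem.Chars.isIn [c] chars_to_encode.toList
      then acc ++ [String.ofList (pvPct c.toNat)]
      else acc ++ [String.ofList [c]]) []
  PySem.Str.join "" result

-- ===== PORT B =====
-- inner while loop of Source B: j advances while j < n and text[j] is not in the special set
def pvFindIdx (special : PySem.Set Char) (text : List Char) (j : Nat) : Nat :=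
  if h : j < text.length then
    if PySem.Set.contains special (text[j]'h) then j
    else pvFindIdx special text (j + 1)
  else j
  termination_by text.length - j

-- the scan never moves j backwards (cited by pvAltLoop's decreasing_by)
theorem pvFindIdx_ge (special : PySem.Set Char) (text : List Char) (j : Nat) :
    j ≤ pvFindIdx special text j := by
  rw [pvFindIdx]
  split
  · split
    · exact le_refl j
    · exact le_trans (Nat.le_succ j) (pvFindIdx_ge special text (j + 1))
  · exact le_refl j
  termination_by text.length - j

-- outer while loop of Source B: append the run text[i:j] (slice, exact), then the encoded
-- delimiter text[j] if any, and continue from j + 1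
def pvAltLoop (special : PySem.Set Char) (text : List Char) (i : Nat)
    (parts : List (List Char)) : List (List Char) :=
  if i < text.length then
    let j := pvFindIdx special text i
    if hj : j < text.length then
      pvAltLoop special text (j + 1)
        (parts ++ [PySem.List.slice text (some (i : Int)) (some (j : Int)),
                   pvPct ((text[j]'hj).toNat)])
    else parts ++ [PySem.List.slice text (some (i : Int)) (some (j : Int))]
  else parts
  termination_by text.length - i
  decreasing_by have := pvFindIdx_ge special text i; omega

-- literal port of Source B: special = set(chars_to_encode); run-based scan from i = 0; ''.join(parts)
def hex_encode_chars_py_alt (text : String) (chars_to_encode : String) : String :=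
  let special : PySem.Set Char := PySem.Set.ofList chars_to_encode.toList
  String.ofList (PySem.Chars.join [] (pvAltLoop special text.toList 0 []))

-- ===== PRECONDITION & SPEC =====
def Spec_hex_encode_chars_py (text : String) (chars_to_encode : String) (out : String) : Prop := out = hex_encode_chars_py_alt text chars_to_encode
instance (text : String) (chars_to_encode : String) (out : String) : Decidable (Spec_hex_encode_chars_py text chars_to_encode out) := by unfold Spec_hex_encode_chars_py; infer_instance

-- ===== CLAIM (what is proved, stated in full; the proofs are below) =====
def Claim_equal_hex_encode_chars_py : Prop := ∀ (text : String) (chars_to_encode : String), Dom_hex_encode_chars_py text chars_to_encode → Spec_hex_encode_chars_py text chars_to_encode (hex_encode_chars_py text chars_to_encode)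

-- ===== LEMMAS AND PROOFS =====

-- A's membership test on a single character is list membership
theorem pvIsIn_singleton (c : Char) (l : List Char) :
    PySem.Chars.isIn [c] l = decide (c ∈ l) := by
  by_cases h : c ∈ l
  · simp only [h, decide_true]
    apply (PySem.Chars.isIn_iff_infix _ _).mpr
    obtain ⟨pre, suf, rfl⟩ := List.mem_iff_append.mp h
    exact ⟨pre, suf, by simp⟩
  · simp only [h, decide_false]
    apply (PySem.Chars.isIn_eq_false_iff _ _).mpr
    intro hinf
    exact h (hinf.mem (List.mem_singleton_self c))

theorem pvFoldl_if_append {α β : Type} (p : α → Bool) (f g : α → β)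
    (l : List α) (acc : List β) :
    l.foldl (fun acc c => if p c then acc ++ [f c] else acc ++ [g c]) acc
      = acc ++ l.map (fun c => if p c then f c else g c) := by
  induction l generalizing acc with
  | nil => simp
  | cons c t ih => by_cases h : p c <;> simp [h, ih]

theorem pvJoin_nil_flatten (ls : List (List Char)) :
    PySem.Chars.join [] ls = ls.flatten := by
  induction ls with
  | nil => simp [PySem.Chars.join_nil]
  | cons p rest ih =>
    cases rest with
    | nil => simp [PySem.Chars.join_singleton]
    | cons q r => simp [PySem.Chars.join_cons_cons, ih]

-- the set membership test is list membership of the underlying element list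
theorem pvContains_decide (s : PySem.Set Char) (c : Char) :
    PySem.Set.contains s c = decide (c ∈ s) := by
  simp [PySem.Set.contains_eq_listContains]

-- the per-character replacement both programs realize
def pvBranch (special : PySem.Set Char) (c : Char) : List Char :=
  if PySem.Set.contains special c then pvPct c.toNat else [c]

-- rest-based counterpart of the inner scan: length of the clean run at the front of rest
def pvRunLen (special : PySem.Set Char) : List Char → Nat
  | [] => 0
  | c :: t => if PySem.Set.contains special c then 0 else pvRunLen special t + 1

-- rest-based counterpart of the outer loop
def pvAltRest (special : PySem.Set Char) (rest : List Char) (parts : List (List Char)) :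
    List (List Char) :=
  if rest = [] then parts
  else
    let k := pvRunLen special rest
    if hk : k < rest.length then
      pvAltRest special (rest.drop (k + 1)) (parts ++ [rest.take k, pvPct ((rest[k]'hk).toNat)])
    else parts ++ [rest.take k]
  termination_by rest.length
  decreasing_by simp only [List.length_drop]; omega

theorem pvRunLen_le (special : PySem.Set Char) (rest : List Char) :
    pvRunLen special rest ≤ rest.length := by
  induction rest with
  | nil => simp [pvRunLen]
  | cons c t ih =>
    simp only [pvRunLen, pvContains_decide, List.length_cons]
    by_cases h : c ∈ special
    · simp [h]
    · simp only [h, decide_false, Bool.false_eq_true, if_false]; omega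

-- when the scan runs off the end, no character of rest is special
theorem pvRunLen_all (special : PySem.Set Char) (rest : List Char)
    (h : pvRunLen special rest = rest.length) :
    rest.flatMap (pvBranch special) = rest := by
  induction rest with
  | nil => simp
  | cons c t ih =>
    rw [pvRunLen] at h
    by_cases hc : c ∈ special
    · rw [pvContains_decide] at h
      simp [hc] at h
    · rw [pvContains_decide] at h
      simp only [hc, decide_false, Bool.false_eq_true, if_false, List.length_cons,
        Nat.add_right_cancel_iff] at h
      simp [pvBranch, hc, ih h]

-- when the scan stops inside rest, rest decomposes as clean run ++ special char ++ remainder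
theorem pvRunLen_split (special : PySem.Set Char) (rest : List Char)
    (h : pvRunLen special rest < rest.length) :
    rest.flatMap (pvBranch special)
      = rest.take (pvRunLen special rest)
        ++ pvPct ((rest.getD (pvRunLen special rest) ' ').toNat)
        ++ (rest.drop (pvRunLen special rest + 1)).flatMap (pvBranch special) := by
  induction rest with
  | nil => simp at h
  | cons c t ih =>
    by_cases hc : c ∈ special
    · have hk : pvRunLen special (c :: t) = 0 := by
        rw [pvRunLen, pvContains_decide]; simp [hc]
      rw [hk]
      simp [pvBranch, hc]
    · have hk : pvRunLen special (c :: t) = pvRunLen special t + 1 := by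
        rw [pvRunLen, pvContains_decide]; simp [hc]
      rw [hk] at h ⊢
      have ht : pvRunLen special t < t.length := by simpa using h
      simp only [List.flatMap_cons, List.take_succ_cons, List.getD_cons_succ,
        List.drop_succ_cons]
      rw [ih ht]
      simp [pvBranch, hc]

-- the index-based inner scan is the rest-based run length, shifted by the start index
theorem pvFindIdx_eq (special : PySem.Set Char) (text : List Char) (j : Nat) :
    pvFindIdx special text j = j + pvRunLen special (text.drop j) := by
  rw [pvFindIdx]
  by_cases h : j < text.length
  · rw [List.drop_eq_getElem_cons h, pvRunLen]
    simp only [pvContains_decide, h, dif_pos]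
    by_cases hc : text[j]'h ∈ special
    · simp [hc]
    · simp only [hc, decide_false, Bool.false_eq_true, if_false]
      rw [pvFindIdx_eq special text (j + 1)]
      omega
  · rw [dif_neg h, List.drop_eq_nil_of_le (Nat.le_of_not_lt h), pvRunLen]
    omega
  termination_by text.length - j

-- the index-based outer loop is the rest-based one on the remaining suffix
theorem pvAltLoop_eq (special : PySem.Set Char) (text : List Char) (i : Nat)
    (parts : List (List Char)) :
    pvAltLoop special text i parts = pvAltRest special (text.drop i) parts := by
  rw [pvAltLoop, pvAltRest, pvFindIdx_eq]
  by_cases h : i < text.length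
  · simp only [h, if_true]
    have hne : text.drop i ≠ [] := by
      intro hx
      have := congrArg List.length hx
      simp at this
      omega
    simp only [hne, if_false]
    have hlen : (text.drop i).length = text.length - i := by simp
    set k := pvRunLen special (text.drop i) with hk
    have hs : PySem.List.slice text (some (i : Int)) (some ((i + k : Nat) : Int))
        = List.take k (List.drop i text) := by
      rw [PySem.List.slice_natCast]
      congr 1
      omega
    by_cases hj : i + k < text.length
    · have hk2 : k < (text.drop i).length := by omega
      have hdd : List.drop (k + 1) (List.drop i text) = List.drop (i + k + 1) text := by
        rw [List.drop_drop]
        congr 1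
      have hg : (List.drop i text)[k]'hk2 = text[i + k]'hj := by
        rw [List.getElem_drop]
      rw [dif_pos hj, dif_pos hk2, hdd, hs, hg,
        pvAltLoop_eq special text (i + k + 1) _]
    · have hk2 : ¬ k < (text.drop i).length := by omega
      rw [dif_neg hj, dif_neg hk2, hs]
  · simp only [h, if_false]
    rw [List.drop_eq_nil_of_le (Nat.le_of_not_lt h)]
    simp
  termination_by text.length - i
  decreasing_by omega

-- the rest-based loop's invariant: flatten of the accumulated parts
theorem pvAltRest_flatten (special : PySem.Set Char) :
    ∀ (n : Nat) (rest : List Char) (parts : List (List Char)), rest.length ≤ n →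
    (pvAltRest special rest parts).flatten
      = parts.flatten ++ rest.flatMap (pvBranch special) := by
  intro n
  induction n with
  | zero =>
    intro rest parts h
    have : rest = [] := List.eq_nil_of_length_eq_zero (Nat.le_zero.mp h)
    subst this
    simp [pvAltRest]
  | succ n ih =>
    intro rest parts h
    by_cases hnil : rest = []
    · subst hnil; simp [pvAltRest]
    · rw [pvAltRest]
      simp only [hnil, if_false]
      by_cases hk : pvRunLen special rest < rest.length
      · simp only [hk, dif_pos]
        rw [ih _ _ (by simp only [List.length_drop]; omega)]
        rw [pvRunLen_split special rest hk,
          show rest[pvRunLen special rest]'hk = rest.getD (pvRunLen special rest) ' ' from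
            (List.getD_eq_getElem rest ' ' hk).symm]
        simp
      · simp only [hk, dif_neg, not_false_iff]
        have he : pvRunLen special rest = rest.length :=
          Nat.le_antisymm (pvRunLen_le special rest) (Nat.not_lt.mp hk)
        rw [pvRunLen_all special rest he]
        simp [he]

-- ===== VERDICT (by name: the statement is the Claim_ definition above) =====
theorem hex_encode_chars_py_spec : Claim_equal_hex_encode_chars_py := by
  intro text chars _
  show hex_encode_chars_py text chars = hex_encode_chars_py_alt text chars
  apply String.toList_inj.mp
  unfold hex_encode_chars_py hex_encode_chars_py_alt
  rw [PySem.Str.toList_join,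
    show String.toList "" = ([] : List Char) from rfl, pvFoldl_if_append,
    String.toList_ofList, pvJoin_nil_flatten, pvJoin_nil_flatten,
    pvAltLoop_eq, List.drop_zero,
    pvAltRest_flatten _ text.toList.length text.toList [] (le_refl _)]
  simp only [List.nil_append, List.map_map, Function.comp_def, apply_ite String.toList,
    String.toList_ofList, List.flatten_nil, List.flatMap_def]
  congr 1
  apply List.map_congr_left
  intro c _
  rw [pvIsIn_singleton, show pvBranch (PySem.Set.ofList chars.toList) c
      = if PySem.Set.contains (PySem.Set.ofList chars.toList) c then pvPct c.toNat else [c]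
      from rfl,
    pvContains_decide]
  by_cases h : c ∈ chars.toList
  · simp [h, PySem.Set.mem_ofList]
  · simp [h, PySem.Set.mem_ofList]
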